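-- pv_equiv track=rewrite | github.com/sh-dinho/nba_analytics | src/monitoring/system_status.py | _severity_from_issues
-- ===== SOURCE A (Python) =====
-- from typing import Dict, Any, List, Optional
--
-- def _severity_from_issues(issues: List[Dict[str, Any]]) -> int:
--     """
--     Compute a simple severity score:
--       0 = no issues
--       1 = info only
--       2 = warnings present
--       3 = errors present
--     """
--     if not issues:
--         return 0
--
--     levels = {i.get("level", "") for i in issues}
--     if "error" in levels:
--         return 3
--     if "warning" in levels:
--         return 2
--     return 1
-- ===== SOURCE B (Python) =====
-- def _severity_from_issues(issues):
--     if not issues: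
--         return 0
--     best = 1
--     for i in issues:
--         lv = i.get("level", "")
--         s = 3 if lv == "error" else (2 if lv == "warning" else 1)
--         if s > best:
--             best = s
--     return best
-- ===== Notes on version B (the rewrite author's own statement) =====
-- stated objective: simpler
-- what changed: Replaces building a set of levels plus two membership checks by a single pass that maps each issue's level to a score (error=3, warning=2, else 1) and keeps a running integer maximum.
import Mathlib
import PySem

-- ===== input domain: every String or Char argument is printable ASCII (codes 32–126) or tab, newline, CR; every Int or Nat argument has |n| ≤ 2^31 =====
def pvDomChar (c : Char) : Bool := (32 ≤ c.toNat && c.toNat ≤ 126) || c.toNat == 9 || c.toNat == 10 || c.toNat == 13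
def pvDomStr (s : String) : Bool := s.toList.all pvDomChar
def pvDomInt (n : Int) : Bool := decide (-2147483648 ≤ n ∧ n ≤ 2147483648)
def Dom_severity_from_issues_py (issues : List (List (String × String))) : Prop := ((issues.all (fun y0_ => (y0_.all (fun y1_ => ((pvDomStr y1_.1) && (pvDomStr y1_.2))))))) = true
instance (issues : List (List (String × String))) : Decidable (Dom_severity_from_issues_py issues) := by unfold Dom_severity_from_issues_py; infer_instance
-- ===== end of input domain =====

-- B replaces A's set-of-levels + membership checks by one running-maximum pass over per-issue scores (objective: simpler).

-- i.get("level", "") : first-match association-list lookup with default ""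
def pyGetLevel (i : List (String × String)) : String :=
  ((i.find? (fun p => p.1 == "level")).map Prod.snd).getD ""

-- ===== PORT A =====
def severity_from_issues_py (issues : List (List (String × String))) : Int :=
  if issues = [] then 0
  else
    let levels : PySem.Set String := PySem.Set.ofList (issues.map (fun i => pyGetLevel i))
    if PySem.Set.contains levels "error" then 3
    else if PySem.Set.contains levels "warning" then 2
    else 1

-- ===== PORT B =====
def scoreB (i : List (String × String)) : Int :=
  let lv := pyGetLevel i
  if lv = "error" then 3 else if lv = "warning" then 2 else 1

def severity_from_issues_py_alt (issues : List (List (String × String))) : Int :=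
  match issues with
  | [] => 0
  | _ => issues.foldl (fun best i => if scoreB i > best then scoreB i else best) 1

-- ===== PRECONDITION & SPEC =====
def Spec_severity_from_issues_py (issues : List (List (String × String))) (out : Int) : Prop := out = severity_from_issues_py_alt issues
instance (issues : List (List (String × String))) (out : Int) : Decidable (Spec_severity_from_issues_py issues out) := by unfold Spec_severity_from_issues_py; infer_instance

-- ===== CLAIM (what is proved, stated in full; the proofs are below) =====
def Claim_equal_severity_from_issues_py : Prop := ∀ (issues : List (List (String × String))), Dom_severity_from_issues_py issues → Spec_severity_from_issues_py issues (severity_from_issues_py issues)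

-- ===== LEMMAS AND PROOFS =====

-- the membership-based value A computes for a nonempty list
def aVal (l : List (List (String × String))) : Int :=
  if "error" ∈ l.map pyGetLevel then 3
  else if "warning" ∈ l.map pyGetLevel then 2 else 1

lemma aVal_nil : aVal [] = 1 := by simp [aVal]

lemma aVal_bounds (l : List (List (String × String))) : 1 ≤ aVal l ∧ aVal l ≤ 3 := by
  unfold aVal; split_ifs <;> omega

lemma scoreB_eq (i : List (String × String)) :
    scoreB i = if pyGetLevel i = "error" then 3 else if pyGetLevel i = "warning" then 2 else 1 := rfl

lemma scoreB_bounds (i : List (String × String)) : 1 ≤ scoreB i ∧ scoreB i ≤ 3 := by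
  rw [scoreB_eq]; split_ifs <;> omega

lemma mem_map_cons_level (x : String) (i : List (String × String))
    (l : List (List (String × String))) :
    (x ∈ (i :: l).map pyGetLevel) ↔ (pyGetLevel i = x ∨ x ∈ l.map pyGetLevel) := by
  rw [List.map_cons, List.mem_cons, eq_comm]

lemma max_scoreB_aVal (i : List (String × String)) (l : List (List (String × String))) :
    max (scoreB i) (aVal l) = aVal (i :: l) := by
  unfold aVal
  rw [scoreB_eq]
  simp only [mem_map_cons_level]
  by_cases he : pyGetLevel i = "error" <;>
    by_cases hw : pyGetLevel i = "warning" <;>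
      by_cases hel : "error" ∈ l.map pyGetLevel <;>
        by_cases hwl : "warning" ∈ l.map pyGetLevel <;>
          simp only [he, hw, hel, hwl, ite_true, ite_false, if_true, if_false, true_or, or_true,
            false_or, or_false, iff_true, iff_false, String.reduceEq, not_false_iff, eq_self_iff_true,
            not_true, or_self, max_def] <;>
          split_ifs <;> omega

-- the running-maximum fold of B, characterised by aVal
lemma fold_char (l : List (List (String × String))) : ∀ b : Int, 1 ≤ b → b ≤ 3 →
    l.foldl (fun best i => if scoreB i > best then scoreB i else best) b = max b (aVal l) := by
  induction l with
  | nil =>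
      intro b hb1 hb3
      rw [List.foldl_nil, aVal_nil, max_def]
      split_ifs <;> omega
  | cons i l ih =>
      intro b hb1 hb3
      have hs := scoreB_bounds i
      have hstep : (if scoreB i > b then scoreB i else b) = max b (scoreB i) := by
        rw [max_def]; split_ifs <;> omega
      rw [List.foldl_cons, hstep, ih (max b (scoreB i)) (le_trans hb1 (le_max_left _ _))
        (max_le hb3 hs.2), max_assoc, max_scoreB_aVal]

theorem severity_eq_aux (issues : List (List (String × String))) :
    severity_from_issues_py issues = severity_from_issues_py_alt issues := by
  cases issues with
  | nil => rfl
  | cons i l =>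
      have hT := aVal_bounds (i :: l)
      have hfold := fold_char (i :: l) 1 (by omega) (by omega)
      unfold severity_from_issues_py severity_from_issues_py_alt
      simp only [if_neg (List.cons_ne_nil i l)]
      rw [hfold]
      have hmax : max 1 (aVal (i :: l)) = aVal (i :: l) := by
        rw [max_def]; split_ifs <;> omega
      rw [hmax]
      unfold aVal
      simp only [PySem.Set.contains_eq_listContains, List.contains_iff_mem, PySem.Set.mem_ofList]

-- ===== VERDICT (by name: the statement is the Claim_ definition above) =====
theorem severity_from_issues_py_spec : Claim_equal_severity_from_issues_py := by
  intro issues _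
  exact severity_eq_aux issues
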